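-- pv_equiv track=rewrite | github.com/kuntito/LeetcodeGrind | grind__active/237 (number of ways to select buildings)/237a.py | getTypeTwo
-- ===== SOURCE A (Python) =====
-- def getTypeTwo(zerosOnes, chars):
--     pass
--     # to get type one, iterate in reverse
--     # create result array, `arr`
--
--     dim = len(chars)
--     arr = [0 for _ in range(dim)]
--
--     # for each val that's '1'
--     # set `arr[i] = the number of zeros in zerosOnes[i + 1][0]`
--     for i in range(dim - 2, -1, -1):
--         bit = chars[i]
--         if bit == '1':
--             arr[i] = zerosOnes[i+1][0]
--         arr[i] += arr[i + 1]
--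
--     return arr
-- ===== SOURCE B (Python) =====
-- def getTypeTwo(zerosOnes, chars):
--     # Forward pass: prefix sums of contributions; arr[i] = total - prefix[i], last entry 0.
--     dim = len(chars)
--     if dim == 0:
--         return []
--     total = 0
--     prefix = []
--     for i in range(dim - 1):
--         prefix.append(total)
--         total += zerosOnes[i + 1][0] if chars[i] == '1' else 0
--     return [total - p for p in prefix] + [0]
-- ===== Notes on version B (the rewrite author's own statement) =====
-- stated objective: alternative
-- what changed: B traverses forward, building prefix sums of the per-position contributions, and obtains each entry by complement arithmetic arr[i] = total - prefix[i] (with a trailing 0), instead of A's backward in-place suffix accumulation over the result array.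
import Mathlib
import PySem

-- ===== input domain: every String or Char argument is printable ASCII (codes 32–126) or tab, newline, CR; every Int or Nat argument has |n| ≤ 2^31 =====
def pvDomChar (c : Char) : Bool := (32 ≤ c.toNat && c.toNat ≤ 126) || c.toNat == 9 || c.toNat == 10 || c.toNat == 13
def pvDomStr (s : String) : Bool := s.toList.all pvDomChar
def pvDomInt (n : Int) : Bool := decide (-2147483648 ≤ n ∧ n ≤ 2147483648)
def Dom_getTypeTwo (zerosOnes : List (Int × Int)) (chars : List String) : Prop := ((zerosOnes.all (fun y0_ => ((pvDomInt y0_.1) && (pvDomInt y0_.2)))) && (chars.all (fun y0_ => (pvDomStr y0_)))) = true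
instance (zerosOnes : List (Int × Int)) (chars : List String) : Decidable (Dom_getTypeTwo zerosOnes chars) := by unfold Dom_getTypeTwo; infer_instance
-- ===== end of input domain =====

-- B traverses forward building prefix sums and takes each entry as total - prefix[i] (complement arithmetic), instead of A's backward in-place suffix accumulation; objective: alternative algorithmic decomposition, same O(n) cost.


-- ===== PORT A =====
-- loop body of A's 'for i in range(dim-2, -1, -1)' (mutating arr at index i)
def pvStepA (zerosOnes : List (Int × Int)) (chars : List String) (arr : List Int) (i : Int) : List Int :=
  let bit := PySem.List.pyGetD chars i ""
  let arr1 := if bit == "1" then arr.set i.toNat (PySem.List.pyGetD zerosOnes (i + 1) (0, 0)).1 else arr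
  arr1.set i.toNat (PySem.List.pyGetD arr1 i 0 + PySem.List.pyGetD arr1 (i + 1) 0)

def getTypeTwo (zerosOnes : List (Int × Int)) (chars : List String) : List Int :=
  let dim : Int := chars.length
  let arr : List Int := (PySem.List.pyRange 0 dim 1).map (fun _ => (0 : Int))
  (PySem.List.pyRange (dim - 2) (-1) (-1)).foldl (pvStepA zerosOnes chars) arr

-- ===== PORT B =====
-- forward pass: state (total, prefix); then arr[i] = total - prefix[i], trailing 0
def getTypeTwo_alt (zerosOnes : List (Int × Int)) (chars : List String) : List Int :=
  let dim : Int := chars.length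
  if dim == 0 then []
  else
    let st := (PySem.List.pyRange 0 (dim - 1) 1).foldl
      (fun (p : Int × List Int) (i : Int) =>
        (p.1 + (if PySem.List.pyGetD chars i "" == "1" then (PySem.List.pyGetD zerosOnes (i + 1) (0, 0)).1 else 0),
         p.2 ++ [p.1])) ((0 : Int), ([] : List Int))
    st.2.map (fun p => st.1 - p) ++ [0]

-- ===== PRECONDITION & SPEC =====
-- Pre_ excludes exactly the inputs where Python A raises IndexError: a '1' at position i < len(chars)-1
-- while zerosOnes has no element at index i+1 (B raises there too).
def Pre_getTypeTwo (zerosOnes : List (Int × Int)) (chars : List String) : Prop :=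
  ∀ i ∈ List.range (chars.length - 1), chars.getD i "" = "1" → i + 1 < zerosOnes.length
instance (zerosOnes : List (Int × Int)) (chars : List String) : Decidable (Pre_getTypeTwo zerosOnes chars) := by unfold Pre_getTypeTwo; infer_instance

def pvWitness_getTypeTwo : (List (Int × Int)) × List String := ([(1, 2), (3, 4), (5, 6)], ["1", "0", "1"])

def Spec_getTypeTwo (zerosOnes : List (Int × Int)) (chars : List String) (out : List Int) : Prop := out = getTypeTwo_alt zerosOnes chars
instance (zerosOnes : List (Int × Int)) (chars : List String) (out : List Int) : Decidable (Spec_getTypeTwo zerosOnes chars out) := by unfold Spec_getTypeTwo; infer_instance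

-- ===== CLAIM (what is proved, stated in full; the proofs are below) =====
def Claim_equal_getTypeTwo : Prop := ∀ (zerosOnes : List (Int × Int)) (chars : List String), Dom_getTypeTwo zerosOnes chars → Pre_getTypeTwo zerosOnes chars → Spec_getTypeTwo zerosOnes chars (getTypeTwo zerosOnes chars)

-- ===== LEMMAS AND PROOFS =====

-- the contribution of position i (Python: zerosOnes[i+1][0] if chars[i]=='1' else 0)
def pvF (zerosOnes : List (Int × Int)) (chars : List String) (i : Nat) : Int :=
  if PySem.List.pyGetD chars (i : Int) "" == "1" then (PySem.List.pyGetD zerosOnes ((i : Int) + 1) (0, 0)).1 else 0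

-- suffix sum of contributions over [i, m)
def pvSuff (zerosOnes : List (Int × Int)) (chars : List String) (m i : Nat) : Int :=
  ((List.range' i (m - i)).map (pvF zerosOnes chars)).sum

-- prefix sum of contributions over [0, i)
def pvPref (zerosOnes : List (Int × Int)) (chars : List String) (i : Nat) : Int :=
  ((List.range i).map (pvF zerosOnes chars)).sum

theorem pvSuff_top (z : List (Int × Int)) (c : List String) (m : Nat) : pvSuff z c m m = 0 := by
  simp [pvSuff]

theorem pvSuff_cons (z : List (Int × Int)) (c : List String) (m i : Nat) (h : i < m) :
    pvSuff z c m i = pvF z c i + pvSuff z c m (i + 1) := by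
  unfold pvSuff
  rw [show m - i = (m - (i + 1)) + 1 from by omega, List.range'_succ]
  simp

theorem pvPref_succ (z : List (Int × Int)) (c : List String) (i : Nat) :
    pvPref z c (i + 1) = pvPref z c i + pvF z c i := by
  unfold pvPref
  rw [List.range_succ]
  simp

theorem pvPref_split (z : List (Int × Int)) (c : List String) (m i : Nat) (h : i ≤ m) :
    pvSuff z c m i = pvPref z c m - pvPref z c i := by
  induction m with
  | zero =>
      have : i = 0 := by omega
      subst this; simp [pvSuff, pvPref]
  | succ m ih =>
      rcases Nat.lt_or_ge i (m + 1) with hlt | hge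
      · rcases Nat.lt_or_ge i m with hlt' | hge'
        · rw [pvPref_succ]
          unfold pvSuff
          rw [show m + 1 - i = (m - i) + 1 from by omega, List.range'_concat,
            show i + 1 * (m - i) = m from by omega]
          simp only [List.map_append, List.sum_append, List.map_cons, List.map_nil,
            List.sum_cons, List.sum_nil]
          have := ih (by omega)
          unfold pvSuff at this
          omega
        · have : i = m := by omega
          rw [this]
          rw [pvPref_succ]
          unfold pvSuff
          rw [show m + 1 - m = 1 from by omega]
          simp
      · have : i = m + 1 := by omega
        subst this
        rw [pvSuff_top]; omega

-- B's forward fold computes (total, prefix list)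
theorem pvFoldB (z : List (Int × Int)) (c : List String) (m : Nat) :
    (List.range m).foldl
      (fun (p : Int × List Int) (i : Nat) =>
        (p.1 + pvF z c i, p.2 ++ [p.1])) ((0 : Int), ([] : List Int))
      = (pvPref z c m, (List.range m).map (pvPref z c)) := by
  induction m with
  | zero => simp [pvPref]
  | succ m ih =>
      rw [List.range_succ, List.foldl_append, ih]
      simp [pvPref_succ]

-- the array state of A's loop after all indices ≥ k have been processed
def pvArrState (z : List (Int × Int)) (c : List String) (n k : Nat) : List Int :=
  List.replicate k (0 : Int) ++ (List.range (n - k)).map (fun j => pvSuff z c (n - 1) (k + j))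

theorem pvMap_range_cons (z : List (Int × Int)) (c : List String) (n k : Nat) (h : k < n) :
    (List.range (n - k)).map (fun j => pvSuff z c (n - 1) (k + j))
      = pvSuff z c (n - 1) k :: (List.range (n - (k + 1))).map (fun j => pvSuff z c (n - 1) (k + 1 + j)) := by
  rw [show n - k = (n - (k + 1)) + 1 from by omega, List.range_succ_eq_map, List.map_cons,
    List.map_map]
  refine List.cons_eq_cons.mpr ⟨by simp, ?_⟩
  apply List.map_congr_left; intro j _
  simp only [Function.comp_apply, Nat.succ_eq_add_one]
  rw [show k + (j + 1) = k + 1 + j from by omega]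

theorem pvStepA_state (z : List (Int × Int)) (c : List String) (n k : Nat) (hk : k + 1 ≤ n - 1) :
    pvStepA z c (pvArrState z c n (k + 1)) (k : Int) = pvArrState z c n k := by
  have hkn : k + 1 < n := by omega
  set s : Int := pvSuff z c (n - 1) (k + 1) with hs
  set T : List Int := (List.range (n - (k + 2))).map (fun j => pvSuff z c (n - 1) (k + 2 + j)) with hT
  have htail : (List.range (n - (k + 1))).map (fun j => pvSuff z c (n - 1) (k + 1 + j)) = s :: T := by
    rw [hs, hT]; exact pvMap_range_cons z c n (k + 1) hkn
  have h1 : pvArrState z c n (k + 1) = List.replicate k (0 : Int) ++ (0 : Int) :: s :: T := by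
    unfold pvArrState
    rw [htail, List.replicate_succ', List.append_assoc, List.singleton_append]
  have h2 : pvArrState z c n k = List.replicate k (0 : Int) ++ pvSuff z c (n - 1) k :: s :: T := by
    unfold pvArrState
    rw [pvMap_range_cons z c n k (by omega), htail]
  have hget1 : ∀ w : Int,
      PySem.List.pyGetD (List.replicate k (0 : Int) ++ w :: s :: T) (k : Int) 0 = w := by
    intro w
    rw [PySem.List.pyGetD_natCast, List.getD_eq_getElem?_getD,
      List.getElem?_append_right (by simp)]
    simp
  have hget2 : ∀ w : Int,
      PySem.List.pyGetD (List.replicate k (0 : Int) ++ w :: s :: T) ((k : Int) + 1) 0 = s := by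
    intro w
    rw [show ((k : Int) + 1) = (((k + 1 : Nat)) : Int) from by push_cast; ring,
      PySem.List.pyGetD_natCast, List.getD_eq_getElem?_getD,
      List.getElem?_append_right (by simp)]
    simp
  have hset : ∀ w x : Int,
      (List.replicate k (0 : Int) ++ w :: s :: T).set k x
        = List.replicate k (0 : Int) ++ x :: s :: T := by
    intro w x
    rw [List.set_append_right _ _ (by simp)]
    simp
  have htoNat : ((k : Int)).toNat = k := Int.toNat_natCast k
  rw [h1, h2]
  simp only [pvStepA]
  by_cases hbit : PySem.List.pyGetD c (k : Int) "" == "1"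
  · rw [if_pos hbit, htoNat, hset, hget1, hget2, hset]
    refine congrArg _ ?_
    refine List.cons_eq_cons.mpr ⟨?_, rfl⟩
    rw [pvSuff_cons z c (n - 1) k (by omega), hs]
    unfold pvF
    rw [if_pos hbit]
  · rw [if_neg hbit, htoNat, hget1, hget2, hset]
    refine congrArg _ ?_
    refine List.cons_eq_cons.mpr ⟨?_, rfl⟩
    rw [pvSuff_cons z c (n - 1) k (by omega), hs]
    unfold pvF
    rw [if_neg hbit, zero_add]

theorem pvLoop (z : List (Int × Int)) (c : List String) (n : Nat) :
    ∀ k, k ≤ n - 1 →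
      (PySem.List.pyRange ((k : Int) - 1) (-1) (-1)).foldl (pvStepA z c) (pvArrState z c n k)
        = pvArrState z c n 0
  | 0, _ => by
      rw [PySem.List.pyRange_neg_one_eq_nil (by norm_num)]
      simp [List.foldl_nil]
  | (k + 1), hk => by
      rw [show (((k + 1 : Nat)) : Int) - 1 = (k : Int) from by push_cast; ring,
        PySem.List.pyRange_neg_one_cons (by omega), List.foldl_cons,
        pvStepA_state z c n k hk]
      exact pvLoop z c n k (by omega)

theorem getTypeTwo_eq (z : List (Int × Int)) (c : List String) :
    getTypeTwo z c = (List.range c.length).map (pvSuff z c (c.length - 1)) := by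
  rcases Nat.eq_zero_or_pos c.length with h | h
  · simp only [getTypeTwo, h]
    rw [PySem.List.pyRange_neg_one_eq_nil (by norm_num : ((0 : Nat) : Int) - 2 ≤ -1)]
    simp
  · set n := c.length with hn
    simp only [getTypeTwo]
    have hinit : (PySem.List.pyRange 0 ((n : Int)) 1).map (fun _ => (0 : Int))
        = pvArrState z c n (n - 1) := by
      rw [PySem.List.pyRange_zero_natCast, List.map_map]
      unfold pvArrState
      rw [show n - (n - 1) = 1 from by omega]
      simp only [List.range_one, List.map_cons, List.map_nil]
      rw [show n - 1 + 0 = n - 1 from by omega, pvSuff_top]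
      rw [← List.replicate_succ']
      rw [show (n - 1) + 1 = n from by omega]
      rw [show ((fun _ => (0 : Int)) ∘ fun k : Nat => ((k : Int))) = (fun _ => (0 : Int)) from rfl]
      rw [List.map_const', List.length_range]
    rw [hinit]
    rw [show ((n : Int)) - 2 = (((n - 1 : Nat)) : Int) - 1 from by omega]
    rw [pvLoop z c n (n - 1) (by omega)]
    unfold pvArrState
    simp

theorem getTypeTwo_alt_eq (z : List (Int × Int)) (c : List String) :
    getTypeTwo_alt z c = (List.range c.length).map (pvSuff z c (c.length - 1)) := by
  rcases Nat.eq_zero_or_pos c.length with h | h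
  · simp only [getTypeTwo_alt, h]
    simp
  · set n := c.length with hn
    simp only [getTypeTwo_alt]
    rw [if_neg (by simp only [beq_iff_eq]; omega)]
    rw [show ((n : Int)) - 1 = (((n - 1 : Nat)) : Int) from by omega,
      PySem.List.pyRange_zero_natCast, List.foldl_map]
    have hstep : (fun (p : Int × List Int) (i : Nat) =>
        (p.1 + (if PySem.List.pyGetD c ((i : Int)) "" == "1"
            then (PySem.List.pyGetD z ((i : Int) + 1) (0, 0)).1 else 0), p.2 ++ [p.1]))
        = (fun (p : Int × List Int) (i : Nat) => (p.1 + pvF z c i, p.2 ++ [p.1])) := rfl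
    rw [hstep, pvFoldB]
    conv_rhs => rw [show n = (n - 1) + 1 from by omega, List.range_succ]
    rw [List.map_append, List.map_map, Nat.add_sub_cancel]
    congr 1
    · apply List.map_congr_left
      intro i hi
      have hlt : i < n - 1 := List.mem_range.mp hi
      simp only [Function.comp_apply]
      rw [pvPref_split z c (n - 1) i (by omega)]
    · simp [pvSuff_top]

-- ===== VERDICT (by name: the statement is the Claim_ definition above) =====
theorem getTypeTwo_spec : Claim_equal_getTypeTwo := by
  intro zerosOnes chars _ _
  unfold Spec_getTypeTwo
  rw [getTypeTwo_eq, getTypeTwo_alt_eq]
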